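-- pv_equiv track=rewrite | github.com/kishwarshafin/pepper | pepper_variant/modules/python/CandidateFinder.py | repeat_annotation
-- ===== SOURCE A (Python) =====
-- def repeat_annotation(sequence, kmer_size):
--     """
--     Annotate sequence with k-mer repeats.
--     """
--     max_observed_repeats = [1 for i in range(len(sequence))]
--     for i in range(len(sequence) - (kmer_size - 1)):
--         kmer_count = 0
--         start_index = i
--         end_index = i + (kmer_size - 1)
--         for j in range(i, len(sequence), kmer_size):
--             if sequence[i:i+kmer_size] == sequence[j:j+kmer_size]:
--                 kmer_count += 1
--             else:
--                 break
--             end_index = j + (kmer_size)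
--         for k in range(start_index, min(len(sequence), end_index)):
--             max_observed_repeats[k] = max(max_observed_repeats[k], kmer_count)
--
--     return max_observed_repeats
-- ===== SOURCE B (Python) =====
-- def repeat_annotation(sequence, kmer_size):
--     """
--     Annotate sequence with k-mer repeats.
--
--     Right-to-left DP: count[i] = 1 + count[i + k] when the k-mer block at i
--     equals the adjacent block at i + k (a prefix of pairwise-equal blocks is
--     the same thing as a prefix of blocks equal to the first one), so each
--     start position is compared once instead of rescanning its whole run.
--     """
--     n = len(sequence)
--     res = [1] * n
--     k = kmer_size
--     if k >= 1:
--         count = [0] * (n + 1)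
--         for i in range(n - k, -1, -1):
--             if sequence[i:i + k] == sequence[i + k:i + 2 * k]:
--                 count[i] = count[i + k] + 1
--             else:
--                 count[i] = 1
--         for i in range(n - k + 1):
--             c = count[i]
--             for p in range(i, i + c * k):
--                 if res[p] < c:
--                     res[p] = c
--     return res
-- ===== Notes on version B (the rewrite author's own statement) =====
-- stated objective: alternative
-- what changed: Replaces A's per-start rescan of the whole repeat run (inner loop comparing every k-mer block back to the first) with a right-to-left DP that compares each position's block to its adjacent block exactly once (count[i] = count[i+k] + 1), then replays the same range-max updates from the precomputed counts.
import Mathlib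
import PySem

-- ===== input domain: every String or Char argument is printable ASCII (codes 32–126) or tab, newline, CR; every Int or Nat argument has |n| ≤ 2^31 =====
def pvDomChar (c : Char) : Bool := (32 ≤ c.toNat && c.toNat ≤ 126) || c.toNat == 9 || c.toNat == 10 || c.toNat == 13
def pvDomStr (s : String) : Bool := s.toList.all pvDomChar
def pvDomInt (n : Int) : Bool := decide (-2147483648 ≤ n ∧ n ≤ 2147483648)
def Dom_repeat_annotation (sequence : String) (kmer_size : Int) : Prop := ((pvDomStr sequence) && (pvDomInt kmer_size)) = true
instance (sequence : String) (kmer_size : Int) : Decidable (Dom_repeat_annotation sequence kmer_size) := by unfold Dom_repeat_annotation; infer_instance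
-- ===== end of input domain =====

-- B replaces A's per-start rescan of each repeat run with a right-to-left DP over adjacent-block
-- comparisons (count[i] = count[i+k] + 1) followed by the same range-max updates; objective: alternative.

-- ===== PORT A =====
-- the inner 'for j in range(i, len(sequence), kmer_size)' loop with its break,
-- carried state = (kmer_count, end_index)
def raScan (l : List Char) (k i : Int) : List Int → Int × Int → Int × Int
  | [], st => st
  | j :: js, st =>
      if PySem.List.slice l (some i) (some (i + k)) = PySem.List.slice l (some j) (some (j + k))
      then raScan l k i js (st.1 + 1, j + k)
      else st

def repeat_annotation (sequence : String) (kmer_size : Int) : List Int :=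
  let l := sequence.toList
  let n : Int := (l.length : Int)
  (PySem.List.pyRange 0 (n - (kmer_size - 1)) 1).foldl
    (fun res i =>
      let st := raScan l kmer_size i (PySem.List.pyRange i n kmer_size) (0, i + (kmer_size - 1))
      (PySem.List.pyRange i (min n st.2) 1).foldl
        (fun r p => PySem.List.pySetD r p (max (PySem.List.pyGetD r p 0) st.1)) res)
    (List.replicate l.length 1)

-- ===== PORT B =====
def repeat_annotation_alt (sequence : String) (kmer_size : Int) : List Int :=
  let l := sequence.toList
  let n : Int := (l.length : Int)
  let res : List Int := List.replicate l.length 1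
  if 1 ≤ kmer_size then
    let count := (PySem.List.pyRange (n - kmer_size) (-1) (-1)).foldl
      (fun count i =>
        if PySem.List.slice l (some i) (some (i + kmer_size)) =
            PySem.List.slice l (some (i + kmer_size)) (some (i + 2 * kmer_size))
        then PySem.List.pySetD count i (PySem.List.pyGetD count (i + kmer_size) 0 + 1)
        else PySem.List.pySetD count i 1)
      (List.replicate (l.length + 1) 0)
    (PySem.List.pyRange 0 (n - kmer_size + 1) 1).foldl
      (fun res i =>
        let c := PySem.List.pyGetD count i 0
        (PySem.List.pyRange i (i + c * kmer_size) 1).foldl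
          (fun r p => if PySem.List.pyGetD r p 0 < c then PySem.List.pySetD r p c else r) res)
      res
  else res

-- ===== PRECONDITION & SPEC =====
-- Pre_ excludes only kmer_size = 0, on which A raises ValueError (range() with step 0).
def Pre_repeat_annotation (sequence : String) (kmer_size : Int) : Prop := kmer_size ≠ 0
instance (sequence : String) (kmer_size : Int) : Decidable (Pre_repeat_annotation sequence kmer_size) := by unfold Pre_repeat_annotation; infer_instance
def pvWitness_repeat_annotation : String × Int := ("abab", 2)

def Spec_repeat_annotation (sequence : String) (kmer_size : Int) (out : List Int) : Prop := out = repeat_annotation_alt sequence kmer_size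
instance (sequence : String) (kmer_size : Int) (out : List Int) : Decidable (Spec_repeat_annotation sequence kmer_size out) := by unfold Spec_repeat_annotation; infer_instance

-- ===== CLAIM (what is proved, stated in full; the proofs are below) =====
def Claim_equal_repeat_annotation : Prop := ∀ (sequence : String) (kmer_size : Int), Dom_repeat_annotation sequence kmer_size → Pre_repeat_annotation sequence kmer_size → Spec_repeat_annotation sequence kmer_size (repeat_annotation sequence kmer_size)

-- ===== LEMMAS AND PROOFS =====

-- range(a, b, s) structure for a positive / negative step
lemma pyRange_pos_cons (a b s : Int) (hs : 0 < s) (hab : a < b) :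
    PySem.List.pyRange a b s = a :: PySem.List.pyRange (a + s) b s := by
  rw [PySem.List.pyRange_of_pos _ _ hs, PySem.List.pyRange_of_pos _ _ hs]
  have hx : (0:Int) ≤ b - a - 1 := by omega
  have hdiv : (b - a + s - 1) / s = (b - a - 1) / s + 1 := by
    have h1 := Int.add_mul_ediv_right (b - a - 1) 1 (by omega : s ≠ 0)
    have h2 : b - a + s - 1 = b - a - 1 + 1 * s := by ring
    rw [h2, h1]
  by_cases hb : a + s < b
  · have h3 : b - (a + s) + s - 1 = b - a - 1 := by ring
    simp only [if_pos hab, if_pos hb, hdiv, h3]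
    have hq : (0:Int) ≤ (b - a - 1) / s := Int.ediv_nonneg hx (by omega)
    rw [show ((b - a - 1) / s + 1).toNat = ((b - a - 1) / s).toNat + 1 by omega]
    rw [List.range_succ_eq_map]
    simp only [List.map_cons, List.map_map, Function.comp_def, List.cons.injEq]
    refine ⟨by push_cast; ring, List.map_congr_left ?_⟩
    intro k _; push_cast; ring
  · have h0 : (b - a - 1) / s = 0 := Int.ediv_eq_zero_of_lt hx (by omega)
    simp [if_pos hab, if_neg hb, hdiv, h0]

lemma pyRange_pos_nil (a b s : Int) (hs : 0 < s) (hab : b ≤ a) : PySem.List.pyRange a b s = [] := by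
  unfold PySem.List.pyRange
  rw [if_neg (by omega : ¬ s = 0)]
  simp only [if_pos hs, if_neg (by omega : ¬ a < b)]
  simp

lemma pyRange_neg_nil (a b s : Int) (hs : s < 0) (hab : a ≤ b) : PySem.List.pyRange a b s = [] := by
  unfold PySem.List.pyRange
  rw [if_neg (by omega : ¬ s = 0)]
  simp only [if_neg (by omega : ¬ 0 < s), if_neg (by omega : ¬ b < a)]
  simp

-- indexing helpers
lemma pyGetD_nonneg (xs : List Int) (i : Int) (h : 0 ≤ i) :
    PySem.List.pyGetD xs i 0 = xs.getD i.toNat 0 := by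
  have h1 := PySem.List.pyGetD_natCast (xs := xs) (n := i.toNat) (d := 0)
  rwa [show ((i.toNat : Nat) : Int) = i by omega] at h1

lemma pyGetD_pySetD (xs : List Int) (a v : Int) (ha : 0 ≤ a) (j : Int) (hj : 0 ≤ j) :
    PySem.List.pyGetD (PySem.List.pySetD xs a v) j 0 =
      if j = a ∧ a < (xs.length : Int) then v else PySem.List.pyGetD xs j 0 := by
  rw [PySem.List.pySetD_of_nonneg _ _ ha, pyGetD_nonneg _ _ hj, pyGetD_nonneg _ _ hj]
  rw [List.getD_eq_getElem?_getD, List.getD_eq_getElem?_getD, List.getElem?_set]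
  by_cases he : j = a
  · subst he
    by_cases hl : j.toNat < xs.length
    · simp [hl, show j < (xs.length : Int) by omega]
    · rw [if_pos rfl, if_neg hl, if_neg (by omega)]
      rw [List.getElem?_eq_none (by omega)]
  · rw [if_neg (by omega : ¬ a.toNat = j.toNat), if_neg (by tauto)]

lemma length_pySetD_nonneg (xs : List Int) (a v : Int) (ha : 0 ≤ a) :
    (PySem.List.pySetD xs a v).length = xs.length := by
  rw [PySem.List.pySetD_of_nonneg _ _ ha]; simp

-- length of a full slice
lemma length_slice_nonneg (l : List Char) (a b : Int) (h0 : 0 ≤ a) (hab : a ≤ b) :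
    (PySem.List.slice l (some a) (some b)).length = min (b.toNat - a.toNat) (l.length - a.toNat) := by
  rw [PySem.List.slice_toNat _ h0 (le_trans h0 hab)]
  simp [List.length_take, List.length_drop]

-- if two adjacent k-blocks (the first one full) are equal, the second is full too
lemma blockeq_bound (l : List Char) (k j : Int) (hk : 1 ≤ k) (h0 : 0 ≤ j)
    (hj : j + k ≤ (l.length : Int))
    (heq : PySem.List.slice l (some j) (some (j + k)) =
           PySem.List.slice l (some (j + k)) (some (j + 2 * k))) :
    j + 2 * k ≤ (l.length : Int) := by
  have e1 := length_slice_nonneg l j (j + k) h0 (by omega)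
  have e2 := length_slice_nonneg l (j + k) (j + 2 * k) (by omega) (by omega)
  rw [heq, e2] at e1
  omega

-- the number of consecutive equal adjacent k-blocks starting at i (B's count[i], and
-- the kmer_count A's scan produces)
def raCnt (l : List Char) (k i : Int) : Int :=
  if h : 1 ≤ k ∧ i + 2 * k ≤ (l.length : Int) ∧
      PySem.List.slice l (some i) (some (i + k)) =
        PySem.List.slice l (some (i + k)) (some (i + 2 * k))
  then raCnt l k (i + k) + 1
  else 1
termination_by ((l.length : Int) - i).toNat
decreasing_by omega

lemma raCnt_eq (l : List Char) (k i : Int) (hk : 1 ≤ k) (h0 : 0 ≤ i)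
    (hi : i ≤ (l.length : Int) - k) :
    raCnt l k i =
      if PySem.List.slice l (some i) (some (i + k)) =
          PySem.List.slice l (some (i + k)) (some (i + 2 * k))
      then raCnt l k (i + k) + 1 else 1 := by
  by_cases hs : PySem.List.slice l (some i) (some (i + k)) =
      PySem.List.slice l (some (i + k)) (some (i + 2 * k))
  · rw [if_pos hs, raCnt, dif_pos ⟨hk, blockeq_bound l k i hk h0 (by omega) hs, hs⟩]
  · rw [if_neg hs, raCnt, dif_neg (by tauto)]

lemma raCnt_pos (l : List Char) (k i : Int) : 1 ≤ raCnt l k i := by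
  have H : ∀ (m : Nat) (i : Int), ((l.length : Int) - i).toNat = m → 1 ≤ raCnt l k i := by
    intro m
    induction m using Nat.strong_induction_on with
    | _ m IH =>
      intro i hm
      rw [raCnt]
      split_ifs with h
      · have h2 := IH ((l.length : Int) - (i + k)).toNat (by omega) (i + k) rfl
        omega
      · omega
  exact H ((l.length : Int) - i).toNat i rfl

lemma raCnt_bound (l : List Char) (k : Int) (hk : 1 ≤ k) :
    ∀ (m : Nat) (i : Int), ((l.length : Int) - i).toNat = m → 0 ≤ i →
      i ≤ (l.length : Int) - k → i + raCnt l k i * k ≤ (l.length : Int) := by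
  intro m
  induction m using Nat.strong_induction_on with
  | _ m IH =>
    intro i hm h0 hi
    rw [raCnt_eq l k i hk h0 hi]
    split_ifs with hs
    · have hb := blockeq_bound l k i hk h0 (by omega) hs
      have h2 := IH ((l.length : Int) - (i + k)).toNat (by omega) (i + k) rfl (by omega) (by omega)
      nlinarith [raCnt_pos l k (i + k)]
    · omega

-- A's scan from position j, given the invariant that the block at j equals the block at i,
-- counts exactly raCnt further matches and ends at j + raCnt * k
lemma raScan_eq (l : List Char) (k i : Int) (hk : 1 ≤ k) :
    ∀ (m : Nat) (j c e : Int), ((l.length : Int) - j).toNat = m → 0 ≤ j →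
      j ≤ (l.length : Int) - k →
      PySem.List.slice l (some i) (some (i + k)) = PySem.List.slice l (some j) (some (j + k)) →
      raScan l k i (PySem.List.pyRange j (l.length : Int) k) (c, e) =
        (c + raCnt l k j, j + raCnt l k j * k) := by
  intro m
  induction m using Nat.strong_induction_on with
  | _ m IH =>
    intro j c e hm h0 hj heq
    rw [pyRange_pos_cons j _ k (by omega) (by omega)]
    rw [raScan, if_pos heq]
    by_cases hs : PySem.List.slice l (some j) (some (j + k)) =
        PySem.List.slice l (some (j + k)) (some (j + 2 * k))
    · have hb := blockeq_bound l k j hk h0 (by omega) hs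
      have h2 := IH ((l.length : Int) - (j + k)).toNat (by omega) (j + k) (c + 1) (j + k) rfl
        (by omega) (by omega) (by rw [show j + k + k = j + 2 * k by ring]; exact heq.trans hs)
      rw [h2, raCnt_eq l k j hk h0 hj, if_pos hs]
      refine Prod.ext ?_ ?_ <;> simp <;> ring
    · rw [raCnt_eq l k j hk h0 hj, if_neg hs]
      by_cases hjk : j + k < (l.length : Int)
      · rw [pyRange_pos_cons (j + k) _ k (by omega) hjk]
        rw [raScan, if_neg ?_]
        · refine Prod.ext ?_ ?_ <;> simp
        · intro hcon
          apply hs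
          rw [← heq, show j + 2 * k = j + k + k by ring]
          exact hcon
      · rw [pyRange_pos_nil (j + k) _ k (by omega) (by omega)]
        rw [raScan]
        refine Prod.ext ?_ ?_ <;> simp

lemma raScan_start (l : List Char) (k i : Int) (hk : 1 ≤ k) (h0 : 0 ≤ i)
    (hi : i ≤ (l.length : Int) - k) :
    raScan l k i (PySem.List.pyRange i (l.length : Int) k) (0, i + (k - 1)) =
      (raCnt l k i, i + raCnt l k i * k) := by
  have h := raScan_eq l k i hk ((l.length : Int) - i).toNat i 0 (i + (k - 1)) rfl h0 hi rfl
  simpa using h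

-- B's count-building loop computes raCnt at every processed index
lemma counts_spec (l : List Char) (k : Int) (hk : 1 ≤ k) :
    ∀ (m : Nat) (a : Int), (a + 1).toNat = m → a ≤ (l.length : Int) - k →
      ∀ count : List Int, count.length = l.length + 1 →
      (∀ j, a < j → j ≤ (l.length : Int) - k → PySem.List.pyGetD count j 0 = raCnt l k j) →
      ∀ j, 0 ≤ j → j ≤ (l.length : Int) - k →
        PySem.List.pyGetD
          ((PySem.List.pyRange a (-1) (-1)).foldl
            (fun count i =>
              if PySem.List.slice l (some i) (some (i + k)) =
                  PySem.List.slice l (some (i + k)) (some (i + 2 * k))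
              then PySem.List.pySetD count i (PySem.List.pyGetD count (i + k) 0 + 1)
              else PySem.List.pySetD count i 1)
            count) j 0 = raCnt l k j := by
  intro m
  induction m using Nat.strong_induction_on with
  | _ m IH =>
    intro a hm ha count hlen hprop j hj0 hj1
    by_cases haneg : a < 0
    · rw [PySem.List.pyRange_neg_one_eq_nil (by omega)]
      exact hprop j (by omega) hj1
    · rw [PySem.List.pyRange_neg_one_cons (by omega)]
      rw [List.foldl_cons]
      refine IH a.toNat (by omega) (a - 1) (by omega) (by omega) _ ?_ ?_ j hj0 hj1
      · split_ifs <;> rw [length_pySetD_nonneg _ _ _ (by omega)] <;> exact hlen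
      · intro j' hj'0 hj'1
        have hj'nn : 0 ≤ j' := by omega
        by_cases hja : j' = a
        · subst hja
          split_ifs with hs
          · rw [pyGetD_pySetD _ _ _ (by omega) _ hj'nn,
              if_pos ⟨rfl, by rw [hlen]; push_cast; omega⟩]
            have hb := blockeq_bound l k j' hk (by omega) (by omega) hs
            rw [hprop (j' + k) (by omega) (by omega)]
            rw [raCnt_eq l k j' hk (by omega) hj'1, if_pos hs]
          · rw [pyGetD_pySetD _ _ _ (by omega) _ hj'nn,
              if_pos ⟨rfl, by rw [hlen]; push_cast; omega⟩]
            rw [raCnt_eq l k j' hk (by omega) hj'1, if_neg hs]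
        · have hgt : a < j' := by omega
          split_ifs with hs
          · rw [pyGetD_pySetD _ _ _ (by omega) _ hj'nn, if_neg (by tauto)]
            exact hprop j' hgt hj'1
          · rw [pyGetD_pySetD _ _ _ (by omega) _ hj'nn, if_neg (by tauto)]
            exact hprop j' hgt hj'1

-- the two per-position update bodies agree: writing max(r[p], c) is the same as
-- the guarded write 'if r[p] < c: r[p] = c'
lemma upd_step (r : List Int) (p c : Int) (hp : 0 ≤ p) (hc : 1 ≤ c) :
    PySem.List.pySetD r p (max (PySem.List.pyGetD r p 0) c) =
      if PySem.List.pyGetD r p 0 < c then PySem.List.pySetD r p c else r := by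
  rw [pyGetD_nonneg _ _ hp, PySem.List.pySetD_of_nonneg _ _ hp,
    PySem.List.pySetD_of_nonneg _ _ hp]
  by_cases hl : p.toNat < r.length
  · rw [List.getD_eq_getElem _ _ hl]
    by_cases hlt : r[p.toNat] < c
    · rw [if_pos hlt, max_eq_right (le_of_lt hlt)]
    · rw [if_neg hlt, max_eq_left (by omega)]
      exact List.set_getElem_self hl
  · rw [List.getD_eq_default _ _ (by omega)]
    rw [if_pos (by omega)]
    rw [List.set_eq_of_length_le (by omega), List.set_eq_of_length_le (by omega)]

-- k ≥ 1: the two programs agree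
lemma pos_case (sequence : String) (kmer_size : Int) (hk : 1 ≤ kmer_size) :
    repeat_annotation sequence kmer_size = repeat_annotation_alt sequence kmer_size := by
  unfold repeat_annotation repeat_annotation_alt
  simp only [if_pos hk]
  rw [show (sequence.toList.length : Int) - (kmer_size - 1) =
      (sequence.toList.length : Int) - kmer_size + 1 by ring]
  apply PySem.List.foldl_congr_mem'
  intro i hi res
  obtain ⟨h0, h1⟩ := (PySem.List.mem_pyRange_one).mp hi
  have hin : i ≤ (sequence.toList.length : Int) - kmer_size := by omega
  simp only [raScan_start sequence.toList kmer_size i hk h0 hin]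
  have hmin : min (sequence.toList.length : Int)
      (i + raCnt sequence.toList kmer_size i * kmer_size) =
      i + raCnt sequence.toList kmer_size i * kmer_size :=
    min_eq_right (raCnt_bound sequence.toList kmer_size hk _ i rfl h0 hin)
  have hcnt := counts_spec sequence.toList kmer_size hk
    ((sequence.toList.length : Int) - kmer_size + 1).toNat
    ((sequence.toList.length : Int) - kmer_size) rfl (le_refl _)
    (List.replicate (sequence.toList.length + 1) 0) (by simp)
    (by intro j hja hjb; omega) i h0 hin
  simp only [hcnt, hmin]
  apply PySem.List.foldl_congr_mem'
  intro p hp r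
  obtain ⟨hp0, _⟩ := (PySem.List.mem_pyRange_one).mp hp
  exact upd_step r p _ (by omega) (raCnt_pos sequence.toList kmer_size i)

-- k ≤ -1: A's update ranges are all empty, so both programs return [1]*n
lemma neg_case (sequence : String) (kmer_size : Int) (hk : kmer_size ≤ -1) :
    repeat_annotation sequence kmer_size = repeat_annotation_alt sequence kmer_size := by
  unfold repeat_annotation repeat_annotation_alt
  simp only [if_neg (by omega : ¬ 1 ≤ kmer_size)]
  have h : ∀ i ∈ PySem.List.pyRange 0 ((sequence.toList.length : Int) - (kmer_size - 1)) 1,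
      ∀ res : List Int,
        (fun res i =>
          let st := raScan sequence.toList kmer_size i
            (PySem.List.pyRange i (sequence.toList.length : Int) kmer_size)
            (0, i + (kmer_size - 1))
          (PySem.List.pyRange i (min (sequence.toList.length : Int) st.2) 1).foldl
            (fun r p => PySem.List.pySetD r p (max (PySem.List.pyGetD r p 0) st.1)) res) res i
        = (fun (res : List Int) (_ : Int) => res) res i := by
    intro i hi res
    obtain ⟨h0, _⟩ := (PySem.List.mem_pyRange_one).mp hi
    by_cases hin : i ≤ (sequence.toList.length : Int)
    · simp only [pyRange_neg_nil i _ kmer_size (by omega) hin]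
      simp only [raScan]
      rw [PySem.List.pyRange_one_eq_nil
        (le_trans (min_le_right _ _) (by omega : i + (kmer_size - 1) ≤ i))]
      simp
    · have hnil : ∀ e : Int,
          PySem.List.pyRange i (min (sequence.toList.length : Int) e) 1 = [] := fun e =>
        PySem.List.pyRange_one_eq_nil (le_trans (min_le_left _ _) (by omega))
      simp only [hnil]
      simp
  exact (PySem.List.foldl_congr_mem' _ _ _ _ h).trans
    (PySem.List.foldl_ignore _ _)

-- ===== VERDICT (by name: the statement is the Claim_ definition above) =====
theorem repeat_annotation_spec : Claim_equal_repeat_annotation := by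
  intro sequence kmer_size _ hpre
  unfold Spec_repeat_annotation
  by_cases hk : 1 ≤ kmer_size
  · exact pos_case sequence kmer_size hk
  · exact neg_case sequence kmer_size
      (by unfold Pre_repeat_annotation at hpre; omega)
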